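-- pv_equiv track=rewrite | github.com/JMCSci/Introduction-to-Programming-Using-Python | Chapter 10/10.4/analyzescores/AnalyzeScores.py | aroundAverage
-- ===== SOURCE A (Python) =====
-- def aroundAverage(list1, average):
--     size = len(list1)
--     lessThanAverage = 0
--     equalToAverage = 0
--     greaterThanAverage = 0
--
--     for i in range(0, size):
--         if(list1[i] < average):
--             lessThanAverage += 1
--         elif(list1[i] == average):
--             equalToAverage += 1
--         else:
--             greaterThanAverage += 1
--
--     return lessThanAverage, equalToAverage, greaterThanAverage
-- ===== SOURCE B (Python) =====
-- def aroundAverage(list1, average):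
--     less = sum(1 for x in list1 if x < average)
--     equal = list1.count(average)
--     return less, equal, len(list1) - less - equal
-- ===== Notes on version B (the rewrite author's own statement) =====
-- stated objective: simpler
-- what changed: Replaces A's single indexed loop with a 3-way branch by two filtered counts (less via a generator sum, equal via list.count) and derives the greater bucket arithmetically as len - less - equal.
import Mathlib
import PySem

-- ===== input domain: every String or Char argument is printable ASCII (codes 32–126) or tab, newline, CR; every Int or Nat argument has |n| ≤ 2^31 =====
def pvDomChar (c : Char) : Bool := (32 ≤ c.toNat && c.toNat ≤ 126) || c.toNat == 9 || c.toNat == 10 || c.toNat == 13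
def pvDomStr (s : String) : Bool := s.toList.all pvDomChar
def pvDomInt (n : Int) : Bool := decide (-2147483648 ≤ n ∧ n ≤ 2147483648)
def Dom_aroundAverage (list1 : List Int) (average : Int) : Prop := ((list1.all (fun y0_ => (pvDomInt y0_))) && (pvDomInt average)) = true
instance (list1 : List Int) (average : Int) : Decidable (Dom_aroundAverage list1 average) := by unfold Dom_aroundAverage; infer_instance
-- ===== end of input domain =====

-- ===== PORT A =====
-- B counts 'less' and 'equal' with two filtered passes and derives 'greater' arithmetically (objective: simpler).
-- literal port of A: loop over range(0,size), 3-way branch updating (less, equal, greater)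
def aroundAverage (list1 : List Int) (average : Int) : Int × Int × Int :=
  let size : Int := list1.length
  (PySem.List.pyRange 0 size 1).foldl
    (fun (acc : Int × Int × Int) i =>
      let (l, e, g) := acc
      match (PySem.List.pyGet? list1 i) with
      | some x =>
        if x < average then (l + 1, e, g)
        else if x = average then (l, e + 1, g)
        else (l, e, g + 1)
      | none => acc)   -- unreachable: i ∈ range(0, len list1)
    (0, 0, 0)

-- ===== PORT B =====
def aroundAverage_alt (list1 : List Int) (average : Int) : Int × Int × Int :=
  let less : Int := ((list1.filter (fun x => x < average)).map (fun _ => (1 : Int))).sum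
  let equal : Int := (PySem.List.count list1 average : Int)
  (less, equal, (list1.length : Int) - less - equal)

-- ===== PRECONDITION & SPEC =====
def Spec_aroundAverage (list1 : List Int) (average : Int) (out : Int × Int × Int) : Prop := out = aroundAverage_alt list1 average
instance (list1 : List Int) (average : Int) (out : Int × Int × Int) : Decidable (Spec_aroundAverage list1 average out) := by unfold Spec_aroundAverage; infer_instance

-- ===== CLAIM (what is proved, stated in full; the proofs are below) =====
def Claim_equal_aroundAverage : Prop := ∀ (list1 : List Int) (average : Int), Dom_aroundAverage list1 average → Spec_aroundAverage list1 average (aroundAverage list1 average)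

-- ===== LEMMAS AND PROOFS =====

-- the loop body of A as a function of the element it reads
def stepA (average : Int) (acc : Int × Int × Int) (x : Int) : Int × Int × Int :=
  if x < average then (acc.1 + 1, acc.2.1, acc.2.2)
  else if x = average then (acc.1, acc.2.1 + 1, acc.2.2)
  else (acc.1, acc.2.1, acc.2.2 + 1)

-- one right-extension step of A's indexed loop
lemma loopA (xs : List Int) (x average : Int) :
    aroundAverage (xs ++ [x]) average = stepA average (aroundAverage xs average) x := by
  unfold aroundAverage
  simp only [List.length_append, List.length_cons, List.length_nil, Nat.zero_add]
  have hsplit : PySem.List.pyRange 0 ((xs.length + 1 : Nat) : Int) 1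
      = PySem.List.pyRange 0 (xs.length : Int) 1 ++ [(xs.length : Int)] := by
    push_cast
    exact PySem.List.pyRange_one_succ_right (by positivity)
  rw [hsplit, List.foldl_append]
  have hpre : ∀ (acc : Int × Int × Int) (i : Int), i ∈ PySem.List.pyRange 0 (xs.length : Int) 1 →
      (fun (acc : Int × Int × Int) i =>
        match (PySem.List.pyGet? (xs ++ [x]) i) with
        | some y =>
          if y < average then (acc.1 + 1, acc.2.1, acc.2.2)
          else if y = average then (acc.1, acc.2.1 + 1, acc.2.2)
          else (acc.1, acc.2.1, acc.2.2 + 1)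
        | none => acc) acc i
      = (fun (acc : Int × Int × Int) i =>
        match (PySem.List.pyGet? xs i) with
        | some y =>
          if y < average then (acc.1 + 1, acc.2.1, acc.2.2)
          else if y = average then (acc.1, acc.2.1 + 1, acc.2.2)
          else (acc.1, acc.2.1, acc.2.2 + 1)
        | none => acc) acc i := by
    intro acc i hi
    have hm := (PySem.List.mem_pyRange_one).1 hi
    obtain ⟨k, rfl⟩ : ∃ k : Nat, i = (k : Int) := ⟨i.toNat, by omega⟩
    have hk : k < xs.length := by exact_mod_cast hm.2
    have hget : PySem.List.pyGet? (xs ++ [x]) (k : Int) = PySem.List.pyGet? xs (k : Int) := by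
      simp [List.getElem?_append_left hk]
    simp only [hget]
  rw [PySem.List.foldl_congr_mem _ _ _ _ hpre]
  have hlast : PySem.List.pyGet? (xs ++ [x]) ((xs.length : Nat) : Int) = some x := by
    have h1 : xs ++ [x] = xs ++ x :: [] := rfl
    rw [h1, PySem.List.pyGet?_append_length]
  simp only [List.foldl_cons, List.foldl_nil, hlast]
  rfl

-- both sides agree, by right induction on the list
lemma agree (list1 : List Int) (average : Int) :
    aroundAverage list1 average = aroundAverage_alt list1 average := by
  induction list1 using List.reverseRecOn with
  | nil => rfl
  | append_singleton xs x ih =>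
    rw [loopA, ih]
    unfold aroundAverage_alt stepA
    simp only [List.filter_append, List.map_append, List.sum_append, PySem.List.count,
      List.count_append, List.length_append, List.length_cons, List.length_nil, Nat.zero_add]
    by_cases h1 : x < average
    · simp only [List.filter_cons, List.count_cons, h1, decide_true, List.filter_nil,
        List.map_cons, List.map_nil, List.sum_cons, List.sum_nil, List.count_nil,
        beq_iff_eq, if_neg (by omega : ¬ x = average)]
      refine Prod.ext ?_ (Prod.ext ?_ ?_) <;> simp <;> push_cast <;> ring
    · by_cases h2 : x = average
      · simp only [List.filter_cons, List.count_cons, h1, decide_false, List.filter_nil,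
          List.map_nil, List.sum_nil, List.count_nil, beq_iff_eq, if_pos h2]
        refine Prod.ext ?_ (Prod.ext ?_ ?_) <;> simp <;> push_cast <;> ring
      · simp only [List.filter_cons, List.count_cons, h1, decide_false, List.filter_nil,
          List.map_nil, List.sum_nil, List.count_nil, beq_iff_eq, if_neg h2]
        refine Prod.ext ?_ (Prod.ext ?_ ?_) <;> simp <;> push_cast <;> ring

-- ===== VERDICT (by name: the statement is the Claim_ definition above) =====
theorem aroundAverage_spec : Claim_equal_aroundAverage := by
  intro list1 average _
  unfold Spec_aroundAverage
  exact agree list1 average
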